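-- pv_equiv track=rewrite | github.com/matthewsolc66/Barcode-Reading | ocr_region_tester.py | clean_ocr_text_aggressive
-- ===== SOURCE A (Python) =====
-- def clean_ocr_text_aggressive(text: str) -> str:
--     """Aggressively clean OCR text by replacing common symbol->digit confusions.
--     This normalizes text BEFORE pattern matching to catch more variations.
--     """
--     # Replace common OCR symbol mistakes with their digit equivalents
--     replacements = {
--         '\u00b0': '6',  # degree symbol → 6
--         'O': '0', 'o': '0', 'Q': '0', 'D': '0',  # O variations → 0
--         'I': '1', 'i': '1', 'l': '1', '|': '1', '!': '1',  # I variations → 1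
--         'Z': '2', 'z': '2',  # Z → 2
--         'B': '8', 'b': '8',  # B → 8 (also could be 3 or 6, but 8 most common)
--         'S': '5', 's': '5',  # S → 5
--         'G': '6', 'g': '9',  # G → 6, g → 9
--         'T': '7', 't': '7',  # T → 7
--         'A': '4', 'a': '4',  # A → 4
--         'q': '9',  # q → 9
--     }
--     cleaned = text
--     for old, new in replacements.items():
--         cleaned = cleaned.replace(old, new)
--     return cleaned
-- ===== SOURCE B (Python) =====
-- def clean_ocr_text_aggressive(text: str) -> str:
--     """Aggressively clean OCR text by replacing common symbol->digit confusions.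
--     Single pass: per-character dict lookup instead of one full-string scan per key.
--     """
--     replacements = {
--         '\u00b0': '6',
--         'O': '0', 'o': '0', 'Q': '0', 'D': '0',
--         'I': '1', 'i': '1', 'l': '1', '|': '1', '!': '1',
--         'Z': '2', 'z': '2',
--         'B': '8', 'b': '8',
--         'S': '5', 's': '5',
--         'G': '6', 'g': '9',
--         'T': '7', 't': '7',
--         'A': '4', 'a': '4',
--         'q': '9',
--     }
--     return ''.join(replacements.get(c, c) for c in text)
-- ===== Notes on version B (the rewrite author's own statement) =====
-- stated objective: simpler
-- what changed: Replaces ~25 sequential full-string .replace passes (one per table entry) with a single pass over the characters doing one dict lookup each; exact because every key is one character and no replacement value is itself a key.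
import Mathlib
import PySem

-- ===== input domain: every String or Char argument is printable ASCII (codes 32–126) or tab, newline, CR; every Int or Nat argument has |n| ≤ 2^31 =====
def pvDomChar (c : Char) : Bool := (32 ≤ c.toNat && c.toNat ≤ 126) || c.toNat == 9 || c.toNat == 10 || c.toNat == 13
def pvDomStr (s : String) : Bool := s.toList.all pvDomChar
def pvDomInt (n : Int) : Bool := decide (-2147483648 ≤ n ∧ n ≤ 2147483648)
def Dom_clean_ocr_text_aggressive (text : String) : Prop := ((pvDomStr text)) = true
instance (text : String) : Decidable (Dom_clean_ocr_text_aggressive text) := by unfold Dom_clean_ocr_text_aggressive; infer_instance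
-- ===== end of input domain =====

-- B replaces A's ~25 sequential full-string replace passes by one pass over the
-- characters with a per-character table lookup (simpler; exact since every key is
-- a single character and no replacement value is itself a key).


-- ===== PORT A =====
-- A's replacement table (a Python dict literal with distinct keys, insertion order)
def replacementsA : PySem.Dict String String := PySem.Dict.mk
  [("\u00b0", "6"),
   ("O", "0"), ("o", "0"), ("Q", "0"), ("D", "0"),
   ("I", "1"), ("i", "1"), ("l", "1"), ("|", "1"), ("!", "1"),
   ("Z", "2"), ("z", "2"),
   ("B", "8"), ("b", "8"),
   ("S", "5"), ("s", "5"),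
   ("G", "6"), ("g", "9"),
   ("T", "7"), ("t", "7"),
   ("A", "4"), ("a", "4"),
   ("q", "9")]

def clean_ocr_text_aggressive (text : String) : String :=
  replacementsA.items.foldl (fun cleaned p => PySem.Str.replace cleaned p.1 p.2) text

-- ===== PORT B =====
-- the same table, keyed per character for the one-pass lookup
def replacementsB : PySem.Dict Char Char := PySem.Dict.mk
  [('\u00b0', '6'),
   ('O', '0'), ('o', '0'), ('Q', '0'), ('D', '0'),
   ('I', '1'), ('i', '1'), ('l', '1'), ('|', '1'), ('!', '1'),
   ('Z', '2'), ('z', '2'),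
   ('B', '8'), ('b', '8'),
   ('S', '5'), ('s', '5'),
   ('G', '6'), ('g', '9'),
   ('T', '7'), ('t', '7'),
   ('A', '4'), ('a', '4'),
   ('q', '9')]

def clean_ocr_text_aggressive_alt (text : String) : String :=
  String.ofList (text.toList.map (fun c => replacementsB.getD c c))

-- ===== PRECONDITION & SPEC =====
def Spec_clean_ocr_text_aggressive (text : String) (out : String) : Prop := out = clean_ocr_text_aggressive_alt text
instance (text : String) (out : String) : Decidable (Spec_clean_ocr_text_aggressive text out) := by unfold Spec_clean_ocr_text_aggressive; infer_instance

-- ===== CLAIM (what is proved, stated in full; the proofs are below) =====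
def Claim_equal_clean_ocr_text_aggressive : Prop := ∀ (text : String), Dom_clean_ocr_text_aggressive text → Spec_clean_ocr_text_aggressive text (clean_ocr_text_aggressive text)

-- ===== LEMMAS AND PROOFS =====

-- the table as a plain char association list (proof helper)
def pvPairs : List (Char × Char) :=
  [('\u00b0', '6'),
   ('O', '0'), ('o', '0'), ('Q', '0'), ('D', '0'),
   ('I', '1'), ('i', '1'), ('l', '1'), ('|', '1'), ('!', '1'),
   ('Z', '2'), ('z', '2'),
   ('B', '8'), ('b', '8'),
   ('S', '5'), ('s', '5'),
   ('G', '6'), ('g', '9'),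
   ('T', '7'), ('t', '7'),
   ('A', '4'), ('a', '4'),
   ('q', '9')]

-- substitute the whole chain left to right (what A does to one character)
def pvApply (l : List (Char × Char)) (c : Char) : Char :=
  l.foldl (fun a p => if a = p.1 then p.2 else a) c

-- first-match lookup (what B does to one character)
def pvLk (l : List (Char × Char)) (c : Char) : Char :=
  match l with
  | [] => c
  | (k, v) :: t => if c = k then v else pvLk t c

theorem pvApply_of_not_key (l : List (Char × Char)) (c : Char)
    (h : ∀ p ∈ l, c ≠ p.1) : pvApply l c = c := by
  induction l with
  | nil => rfl
  | cons p t ih =>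
      simp only [pvApply, List.foldl_cons, if_neg (h p (by simp))]
      exact ih (fun q hq => h q (by simp [hq]))

theorem pvApply_eq_pvLk (l : List (Char × Char)) (c : Char)
    (H : ∀ p ∈ l, ∀ q ∈ l, p.2 ≠ q.1) : pvApply l c = pvLk l c := by
  induction l with
  | nil => rfl
  | cons p t ih =>
      simp only [pvApply, List.foldl_cons]
      by_cases h : c = p.1
      · simp only [pvLk, if_pos h]
        exact pvApply_of_not_key t p.2
          (fun q hq => H p (by simp) q (by simp [hq]))
      · simp only [pvLk, if_neg h]
        exact ih (fun a ha b hb => H a (by simp [ha]) b (by simp [hb]))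

theorem pvLk_eq_getD (l : List (Char × Char)) (c : Char) :
    (PySem.Dict.mk l).getD c c = pvLk l c := by
  induction l with
  | nil => simp [PySem.Dict.getD, PySem.Dict.get?, pvLk]
  | cons p t ih =>
      obtain ⟨k, v⟩ := p
      simp only [pvLk, PySem.Dict.getD, PySem.Dict.get?_mk_cons] at *
      by_cases h : c = k
      · simp [h]
      · simp only [beq_iff_eq, if_neg h, if_neg (fun hh : k = c => h hh.symm)]
        exact ih

theorem go_single (o n : Char) :
    ∀ (fuel : Nat) (l acc : List Char), l.length ≤ fuel →
      PySem.Chars.replace.go [o] [n] fuel l acc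
        = acc.reverse ++ l.map (fun c => if c = o then n else c) := by
  intro fuel
  induction fuel with
  | zero =>
      intro l acc h
      have : l = [] := List.eq_nil_of_length_eq_zero (Nat.le_zero.mp h)
      subst this; simp [PySem.Chars.replace.go]
  | succ f ih =>
      intro l acc h
      cases l with
      | nil => simp [PySem.Chars.replace.go]
      | cons c t =>
          simp only [PySem.Chars.replace.go]
          by_cases hc : c = o
          · have hpre : List.isPrefixOf [o] (c :: t) = true := by
              simp [List.isPrefixOf, hc]
            rw [if_pos hpre]
            have := ih t ([n].reverse ++ acc) (by simpa using Nat.lt_succ_iff.mp (by simpa using h))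
            simpa [hc] using this
          · have hpre : List.isPrefixOf [o] (c :: t) = false := by
              simp [List.isPrefixOf]
              exact fun hh => (hc hh.symm).elim
            rw [if_neg (by simp [hpre])]
            have := ih t (c :: acc) (by simpa using Nat.lt_succ_iff.mp (by simpa using h))
            simpa [hc] using this

theorem replace_single (s : List Char) (o n : Char) :
    PySem.Chars.replace s [o] [n] = s.map (fun c => if c = o then n else c) := by
  simp only [PySem.Chars.replace, List.isEmpty]
  simpa using go_single o n s.length s [] le_rfl

theorem foldl_replace_map (l : List (Char × Char)) :
    ∀ s : String,
      (l.foldl (fun t p => PySem.Str.replace t (String.ofList [p.1]) (String.ofList [p.2])) s).toList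
        = s.toList.map (fun c => pvApply l c) := by
  induction l with
  | nil => intro s; simp [pvApply]
  | cons p t ih =>
      intro s
      simp only [List.foldl_cons, ih, PySem.Str.toList_replace]
      simp only [String.toList_ofList, replace_single, List.map_map]
      apply List.map_congr_left
      intro c _
      simp [pvApply, Function.comp]

theorem itemsA_eq : replacementsA.items
    = pvPairs.map (fun p => (String.ofList [p.1], String.ofList [p.2])) := by decide

-- ===== VERDICT (by name: the statement is the Claim_ definition above) =====
theorem clean_ocr_text_aggressive_spec : Claim_equal_clean_ocr_text_aggressive := by
  intro text _
  unfold Spec_clean_ocr_text_aggressive clean_ocr_text_aggressive clean_ocr_text_aggressive_alt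
  apply String.toList_injective  -- compare as char lists
  rw [itemsA_eq, List.foldl_map]
  rw [foldl_replace_map pvPairs text]
  simp only [String.toList_ofList]
  apply List.map_congr_left
  intro c _
  rw [pvApply_eq_pvLk pvPairs c (by decide)]
  rw [show replacementsB = PySem.Dict.mk pvPairs from rfl, pvLk_eq_getD]
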